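-- pv_equiv track=rewrite | github.com/henrinikku/tira2021 | viikko2/bitpairs.py | calculate
-- ===== SOURCE A (Python) =====
-- def calculate(s: str):
--     distance = 0
--     occurrences = 0
--     result = 0
--     for i, c in enumerate(s):
--         if c == "1":
--             result += (occurrences * i) - distance
--             occurrences += 1
--             distance += i
--
--     return result
-- ===== SOURCE B (Python) =====
-- def calculate(s: str):
--     positions = [i for i, c in enumerate(s) if c == "1"]
--
--     def pair_sum(ps):
--         if not ps:
--             return 0
--         first, rest = ps[0], ps[1:]
--         return sum(q - first for q in rest) + pair_sum(rest)
--
--     return pair_sum(positions)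
-- ===== Notes on version B (the rewrite author's own statement) =====
-- stated objective: simpler
-- what changed: B first collects the list of positions of the one-bits and sums the pairwise distances by explicit head-vs-rest recursion over that list, instead of A's single pass with running occurrence-count and distance accumulators.
import Mathlib
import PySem

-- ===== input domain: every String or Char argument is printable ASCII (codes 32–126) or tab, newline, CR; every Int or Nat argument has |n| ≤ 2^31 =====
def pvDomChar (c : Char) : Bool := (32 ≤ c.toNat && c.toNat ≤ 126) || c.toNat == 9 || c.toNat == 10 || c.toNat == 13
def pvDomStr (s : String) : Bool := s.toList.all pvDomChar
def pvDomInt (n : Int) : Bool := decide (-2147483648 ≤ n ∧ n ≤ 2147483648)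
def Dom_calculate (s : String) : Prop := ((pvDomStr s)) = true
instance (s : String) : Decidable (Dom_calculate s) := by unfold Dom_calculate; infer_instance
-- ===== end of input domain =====

-- B collects the '1' positions into a list and sums pairwise distances by head-vs-rest recursion,
-- instead of A's single pass with running occurrence/distance accumulators (objective: simpler).


-- ===== PORT A =====
-- state = (distance, occurrences, result), exactly A's three accumulators
def calculate (s : String) : Int :=
  let st := (PySem.List.enumerate s.toList).foldl
    (fun (st : Int × Int × Int) (ic : Int × Char) =>
      if ic.2 = '1' then (st.1 + ic.1, st.2.1 + 1, st.2.2 + (st.2.1 * ic.1 - st.1))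
      else st)
    (0, 0, 0)
  st.2.2

-- ===== PORT B =====
-- pair_sum: head-vs-rest recursion of Source B
def pairSum : List Int → Int
  | [] => 0
  | p :: rest => (rest.map (fun q => q - p)).sum + pairSum rest

def calculate_alt (s : String) : Int :=
  pairSum ((PySem.List.enumerate s.toList).filterMap
    (fun ic => if ic.2 = '1' then some ic.1 else none))

-- ===== PRECONDITION & SPEC =====
def Spec_calculate (s : String) (out : Int) : Prop := out = calculate_alt s
instance (s : String) (out : Int) : Decidable (Spec_calculate s out) := by unfold Spec_calculate; infer_instance

-- ===== CLAIM (what is proved, stated in full; the proofs are below) =====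
def Claim_equal_calculate : Prop := ∀ (s : String), Dom_calculate s → Spec_calculate s (calculate s)

-- ===== LEMMAS AND PROOFS =====
theorem sum_map_sub (p : Int) (l : List Int) :
    (l.map (fun q => q - p)).sum = l.sum - p * l.length := by
  induction l with
  | nil => simp
  | cons x xs ih => simp [ih]; ring

theorem foldA_eq (l : List (Int × Char)) (d o r : Int) :
    (l.foldl
      (fun (st : Int × Int × Int) (ic : Int × Char) =>
        if ic.2 = '1' then (st.1 + ic.1, st.2.1 + 1, st.2.2 + (st.2.1 * ic.1 - st.1))
        else st)
      (d, o, r)).2.2 =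
    r + pairSum (l.filterMap (fun ic => if ic.2 = '1' then some ic.1 else none))
      + o * (l.filterMap (fun ic => if ic.2 = '1' then some ic.1 else none)).sum
      - d * (l.filterMap (fun ic => if ic.2 = '1' then some ic.1 else none)).length := by
  induction l generalizing d o r with
  | nil => simp [pairSum]
  | cons ic tl ih =>
    by_cases h : ic.2 = '1'
    · simp [List.foldl_cons, h, ih, pairSum, sum_map_sub]
      ring
    · simp [List.foldl_cons, h, ih]

-- ===== VERDICT (by name: the statement is the Claim_ definition above) =====
theorem calculate_spec : Claim_equal_calculate := by
  intro s _
  show calculate s = calculate_alt s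
  simp [calculate, calculate_alt, foldA_eq]
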